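-- pv_equiv track=rewrite | github.com/Plastonick/advent-of-code | 2021/17 - Trick Shot/17.py | x_pos
-- ===== SOURCE A (Python) =====
-- def x_pos(initial_x: int, vx: int, steps: int) -> int:
--     pos = initial_x
--     for _ in range(steps):
--         pos += vx
--         if vx < 0:
--             xd = 1
--         elif vx > 0:
--             xd = -1
--         else:
--             xd = 0
--         vx += xd
--     return pos
-- ===== SOURCE B (Python) =====
-- def x_pos(initial_x: int, vx: int, steps: int) -> int:
--     # Closed form: the x-velocity decays toward 0, so only the first
--     # min(steps, |vx|) steps move; their displacements form an arithmetic series.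
--     n = max(steps, 0)
--     a = abs(vx)
--     m = min(n, a)
--     s = m * a - m * (m - 1) // 2
--     if vx > 0:
--         return initial_x + s
--     if vx < 0:
--         return initial_x - s
--     return initial_x
-- ===== Notes on version B (the rewrite author's own statement) =====
-- stated objective: faster
-- what changed: Replaced the step-by-step velocity-decay loop with a closed-form arithmetic-series formula over the first min(steps,|vx|) moving steps.
import Mathlib
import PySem

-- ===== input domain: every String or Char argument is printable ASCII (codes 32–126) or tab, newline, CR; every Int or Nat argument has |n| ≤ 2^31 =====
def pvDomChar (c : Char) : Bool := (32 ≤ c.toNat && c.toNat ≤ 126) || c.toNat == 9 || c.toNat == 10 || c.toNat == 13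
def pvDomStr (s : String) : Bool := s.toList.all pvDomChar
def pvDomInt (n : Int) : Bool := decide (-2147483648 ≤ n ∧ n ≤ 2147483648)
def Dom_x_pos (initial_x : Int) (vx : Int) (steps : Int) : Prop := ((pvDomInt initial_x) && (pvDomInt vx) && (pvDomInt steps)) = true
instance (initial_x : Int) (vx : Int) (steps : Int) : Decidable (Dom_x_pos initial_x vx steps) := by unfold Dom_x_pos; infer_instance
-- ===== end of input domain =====

-- B replaces A's step-by-step velocity-decay loop with a closed-form
-- arithmetic-series formula (objective: faster, O(steps) -> O(1)).

-- ===== PORT A =====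
-- the body of A's 'for _ in range(steps)' loop, iterated by fuel = number of iterations
def xposLoop (pos : Int) (vx : Int) : Nat → Int
  | 0 => pos
  | k + 1 =>
    let pos' := pos + vx
    let xd : Int := if vx < 0 then 1 else if vx > 0 then -1 else 0
    xposLoop pos' (vx + xd) k

def x_pos (initial_x : Int) (vx : Int) (steps : Int) : Int :=
  xposLoop initial_x vx steps.toNat

-- ===== PORT B =====
def x_pos_alt (initial_x : Int) (vx : Int) (steps : Int) : Int :=
  let n := max steps 0
  let a := |vx|
  let m := min n a
  let s := m * a - PySem.Int.floordiv (m * (m - 1)) 2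
  if vx > 0 then initial_x + s
  else if vx < 0 then initial_x - s
  else initial_x

-- ===== PRECONDITION & SPEC =====
def Spec_x_pos (initial_x : Int) (vx : Int) (steps : Int) (out : Int) : Prop := out = x_pos_alt initial_x vx steps
instance (initial_x : Int) (vx : Int) (steps : Int) (out : Int) : Decidable (Spec_x_pos initial_x vx steps out) := by unfold Spec_x_pos; infer_instance

-- ===== CLAIM (what is proved, stated in full; the proofs are below) =====
def Claim_equal_x_pos : Prop := ∀ (initial_x : Int) (vx : Int) (steps : Int), Dom_x_pos initial_x vx steps → Spec_x_pos initial_x vx steps (x_pos initial_x vx steps)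

-- ===== LEMMAS AND PROOFS =====

-- total displacement of k steps starting with nonnegative speed a
def pvG (a : Int) (k : Nat) : Int :=
  min (k : Int) a * a - min (k : Int) a * (min (k : Int) a - 1) / 2

-- signed total displacement of k steps starting with velocity vx
def pvF (vx : Int) (k : Nat) : Int :=
  if vx > 0 then pvG vx k
  else if vx < 0 then -(pvG (-vx) k)
  else 0

lemma pvG_zero (k : Nat) : pvG 0 k = 0 := by
  simp [pvG]

lemma pvG_zero_steps (a : Int) (_ : 0 ≤ a) : pvG a 0 = 0 := by
  unfold pvG
  have h : min ((0 : Nat) : Int) a = 0 := by omega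
  rw [h]
  ring_nf

lemma pvG_succ (a : Int) (k : Nat) (ha : 1 ≤ a) :
    pvG a (k + 1) = a + pvG (a - 1) k := by
  unfold pvG
  have hm : min (((k + 1 : Nat)) : Int) a = min (k : Int) (a - 1) + 1 := by
    push_cast; omega
  set m' := min (k : Int) (a - 1) with hm'
  rw [hm]
  have hdiv : (m' + 1) * ((m' + 1) - 1) / 2 = m' * (m' - 1) / 2 + m' := by
    have h1 : (m' + 1) * ((m' + 1) - 1) = m' * (m' - 1) + m' * 2 := by ring
    rw [h1, Int.add_mul_ediv_right _ _ (by norm_num : (2:Int) ≠ 0)]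
  rw [hdiv]
  ring

lemma pvF_nonneg_eq_G (a : Int) (k : Nat) (ha : 0 ≤ a) : pvF a k = pvG a k := by
  unfold pvF
  rcases lt_or_eq_of_le ha with h | h
  · simp [h]
  · simp [← h, pvG_zero]

lemma pvF_nonpos (a : Int) (k : Nat) (ha : a ≤ 0) : pvF a k = -(pvG (-a) k) := by
  unfold pvF
  rcases lt_or_eq_of_le ha with h | h
  · simp [h, not_lt_of_gt h]
  · simp [h, pvG_zero]

lemma pvF_succ (vx : Int) (k : Nat) :
    pvF vx (k + 1) = vx + pvF (vx + (if vx < 0 then 1 else if vx > 0 then (-1 : Int) else 0)) k := by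
  rcases lt_trichotomy vx 0 with h | h | h
  · have h1 : ¬ vx > 0 := by omega
    rw [if_pos h]
    rw [pvF_nonpos vx (k + 1) (le_of_lt h), pvF_nonpos (vx + 1) k (by omega)]
    rw [pvG_succ (-vx) k (by omega)]
    rw [show -(vx + 1) = -vx - 1 by ring]
    ring
  · simp [pvF, h]
  · have h1 : ¬ vx < 0 := by omega
    rw [if_neg h1, if_pos h]
    rw [pvF_nonneg_eq_G vx (k + 1) (le_of_lt h), pvF_nonneg_eq_G (vx + -1) k (by omega)]
    rw [pvG_succ vx k (by omega)]
    rw [show vx + -1 = vx - 1 by ring]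

lemma xposLoop_eq (k : Nat) : ∀ (pos vx : Int), xposLoop pos vx k = pos + pvF vx k := by
  induction k with
  | zero =>
    intro pos vx
    rcases lt_trichotomy vx 0 with h | h | h
    · simp [xposLoop, pvF_nonpos vx 0 (le_of_lt h), pvG_zero_steps (-vx) (by omega)]
    · simp [xposLoop, pvF, h]
    · simp [xposLoop, pvF_nonneg_eq_G vx 0 (le_of_lt h), pvG_zero_steps vx (le_of_lt h)]
  | succ n ih =>
    intro pos vx
    rw [xposLoop, ih, pvF_succ]
    ring

lemma alt_eq_F (initial_x vx steps : Int) :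
    x_pos_alt initial_x vx steps = initial_x + pvF vx steps.toNat := by
  unfold x_pos_alt pvF pvG
  have hcast : ((steps.toNat : Int)) = max steps 0 := by omega
  have hfd : ∀ m : Int, PySem.Int.floordiv (m * (m - 1)) 2 = m * (m - 1) / 2 := fun m =>
    PySem.Int.floordiv_eq_ediv_of_pos (by norm_num)
  rcases lt_trichotomy vx 0 with h | h | h
  · have h1 : ¬ vx > 0 := by omega
    simp only [if_pos h, if_neg h1, hfd, hcast, abs_of_neg h]
    ring
  · simp [h]
  · have h1 : ¬ vx < 0 := by omega
    simp only [if_pos h, if_neg h1, hfd, hcast, abs_of_pos h]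

-- ===== VERDICT (by name: the statement is the Claim_ definition above) =====
theorem x_pos_spec : Claim_equal_x_pos := by
  intro initial_x vx steps _
  unfold Spec_x_pos x_pos
  rw [xposLoop_eq, alt_eq_F]
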